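-- pv_equiv track=rewrite | github.com/smartdesarrollador/-sd_pn_v3 | src/core/table_validator.py | validate_table_data
-- ===== SOURCE A (Python) =====
-- from typing import List, Tuple, Dict, Any, Optional
--
-- def validate_table_data(
--     table_data: List[List[str]],
--     min_filled: int = 1
-- ) -> Tuple[bool, str, int]:
--     """
--     Valida que los datos de tabla tengan al menos N celdas llenas.
--
--     Args:
--         table_data: Matriz de datos (lista de listas)
--         min_filled: Mínimo de celdas llenas requeridas
--
--     Returns:
--         Tuple (is_valid: bool, error_message: str, filled_count: int)
--     """
--     if not table_data:
--         return False, "Los datos de la tabla están vacíos", 0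
--
--     # Contar celdas llenas
--     filled_count = 0
--     for row in table_data:
--         if not isinstance(row, list):
--             return False, "Formato de datos inválido (debe ser lista de listas)", 0
--
--         for cell in row:
--             if cell and str(cell).strip():
--                 filled_count += 1
--
--     # Validar mínimo de celdas llenas
--     if filled_count < min_filled:
--         return False, f"Se requieren al menos {min_filled} celda(s) con datos (encontradas: {filled_count})", filled_count
--
--     return True, "", filled_count
-- ===== SOURCE B (Python) =====
-- def validate_table_data(table_data, min_filled=1):
--     if not table_data:
--         return False, "Los datos de la tabla están vacíos", 0
--     # Consume a stack of rows back-to-front, tallying total cells and BLANK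
--     # cells; the filled count is recovered by complement: total - blank.
--     total_cells = 0
--     blank_cells = 0
--     stack = list(table_data)
--     while stack:
--         row = stack.pop()
--         if not isinstance(row, list):
--             return False, "Formato de datos inválido (debe ser lista de listas)", 0
--         total_cells += len(row)
--         for cell in row:
--             if not (cell and str(cell).strip()):
--                 blank_cells += 1
--     filled_count = total_cells - blank_cells
--     if filled_count < min_filled:
--         return False, f"Se requieren al menos {min_filled} celda(s) con datos (encontradas: {filled_count})", filled_count
--     return True, "", filled_count
-- ===== Notes on version B (the rewrite author's own statement) =====
-- stated objective: alternative
-- what changed: Instead of a forward loop that counts filled cells, B consumes a stack of rows back-to-front with pop() and tallies total cells and blank cells, recovering the filled count by complement (total - blank) before the threshold check.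
import Mathlib
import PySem

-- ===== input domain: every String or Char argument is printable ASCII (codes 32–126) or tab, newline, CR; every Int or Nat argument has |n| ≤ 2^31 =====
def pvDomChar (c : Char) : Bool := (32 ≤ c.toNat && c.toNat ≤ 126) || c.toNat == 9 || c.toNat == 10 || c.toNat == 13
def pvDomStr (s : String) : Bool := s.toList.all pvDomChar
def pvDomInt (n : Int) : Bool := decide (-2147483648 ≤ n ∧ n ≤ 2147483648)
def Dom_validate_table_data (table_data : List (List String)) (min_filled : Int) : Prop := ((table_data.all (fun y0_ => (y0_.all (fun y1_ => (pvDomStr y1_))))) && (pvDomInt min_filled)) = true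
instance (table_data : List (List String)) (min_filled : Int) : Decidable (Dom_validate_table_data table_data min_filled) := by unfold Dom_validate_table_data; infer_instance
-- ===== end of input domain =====

-- B replaces A's forward filled-cell count with a back-to-front stack consumption tallying total and blank cells, deriving filled = total - blank (alternative algorithm; same return values).


-- ===== PORT A =====
-- Port of A: single forward loop counting filled cells (the isinstance check is vacuous under the type convention: rows are lists by type).
def validate_table_data (table_data : List (List String)) (min_filled : Int) : Bool × String × Int :=
  if table_data = [] then (false, "Los datos de la tabla están vacíos", 0)
  else
    let filled_count : Int := table_data.foldl (fun acc row =>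
      row.foldl (fun a cell =>
        if cell ≠ "" ∧ PySem.Str.strip cell ≠ "" then a + 1 else a) acc) 0
    if filled_count < min_filled then
      (false, "Se requieren al menos " ++ PySem.Int.toStr min_filled ++ " celda(s) con datos (encontradas: " ++ PySem.Int.toStr filled_count ++ ")", filled_count)
    else (true, "", filled_count)

-- ===== PORT B =====
-- B's while-loop popping rows from the END of a stack copy: transliterated as head recursion
-- over the REVERSED list (stack.pop() = head of the reverse); returns (total_cells, blank_cells).
def vtd_stack_loop : List (List String) → Int → Int → Int × Int
  | [], total, blank => (total, blank)
  | row :: rest, total, blank =>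
      vtd_stack_loop rest (total + (row.length : Int))
        (row.foldl (fun b cell =>
          if ¬ (cell ≠ "" ∧ PySem.Str.strip cell ≠ "") then b + 1 else b) blank)

-- Port of B: empty guard, stack consumption counting total and blank cells, filled = total - blank, threshold check.
def validate_table_data_alt (table_data : List (List String)) (min_filled : Int) : Bool × String × Int :=
  if table_data = [] then (false, "Los datos de la tabla están vacíos", 0)
  else
    let tb := vtd_stack_loop table_data.reverse 0 0
    let filled_count : Int := tb.1 - tb.2
    if filled_count < min_filled then
      (false, "Se requieren al menos " ++ PySem.Int.toStr min_filled ++ " celda(s) con datos (encontradas: " ++ PySem.Int.toStr filled_count ++ ")", filled_count)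
    else (true, "", filled_count)

-- ===== PRECONDITION & SPEC =====
def Spec_validate_table_data (table_data : List (List String)) (min_filled : Int) (out : Bool × String × Int) : Prop := out = validate_table_data_alt table_data min_filled
instance (table_data : List (List String)) (min_filled : Int) (out : Bool × String × Int) : Decidable (Spec_validate_table_data table_data min_filled out) := by unfold Spec_validate_table_data; infer_instance

-- ===== CLAIM (what is proved, stated in full; the proofs are below) =====
def Claim_equal_validate_table_data : Prop := ∀ (table_data : List (List String)) (min_filled : Int), Dom_validate_table_data table_data min_filled → Spec_validate_table_data table_data min_filled (validate_table_data table_data min_filled)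

-- ===== LEMMAS AND PROOFS =====

def vtd_fill (cell : String) : Bool := decide (cell ≠ "" ∧ PySem.Str.strip cell ≠ "")

lemma vtd_inner_fill (row : List String) (a : Int) :
    row.foldl (fun a cell => if cell ≠ "" ∧ PySem.Str.strip cell ≠ "" then a + 1 else a) a
      = a + (row.countP vtd_fill : Nat) := by
  induction row generalizing a with
  | nil => simp
  | cons c t ih =>
    simp only [List.foldl_cons, List.countP_cons, ih, vtd_fill]
    by_cases h : c ≠ "" ∧ PySem.Str.strip c ≠ ""
    · simp [h]; ring
    · simp [h]

lemma vtd_inner_blank (row : List String) (b : Int) :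
    row.foldl (fun b cell => if ¬ (cell ≠ "" ∧ PySem.Str.strip cell ≠ "") then b + 1 else b) b
      = b + (row.countP (fun c => ! vtd_fill c) : Nat) := by
  induction row generalizing b with
  | nil => simp
  | cons c t ih =>
    simp only [List.foldl_cons, List.countP_cons, ih, vtd_fill]
    by_cases h : c ≠ "" ∧ PySem.Str.strip c ≠ ""
    · simp [h]
    · simp [h]; ring

lemma vtd_stack_loop_spec (l : List (List String)) (t b : Int) :
    vtd_stack_loop l t b
      = (t + ((l.map (fun r => (r.length : Int))).sum),
         b + ((l.map (fun r => ((r.countP (fun c => ! vtd_fill c) : Nat) : Int))).sum)) := by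
  induction l generalizing t b with
  | nil => simp [vtd_stack_loop]
  | cons r rest ih =>
    simp only [vtd_stack_loop, ih, vtd_inner_blank, List.map_cons, List.sum_cons, Prod.mk.injEq]
    exact ⟨by ring, by ring⟩

lemma vtd_outer_fill (td : List (List String)) (a : Int) :
    td.foldl (fun acc row => row.foldl (fun a cell =>
        if cell ≠ "" ∧ PySem.Str.strip cell ≠ "" then a + 1 else a) acc) a
      = a + ((td.map (fun r => ((r.countP vtd_fill : Nat) : Int))).sum) := by
  induction td generalizing a with
  | nil => simp
  | cons r rest ih =>
    rw [List.foldl_cons, vtd_inner_fill, ih]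
    simp only [List.map_cons, List.sum_cons]
    ring

lemma vtd_row_complement (r : List String) :
    ((r.length : Int)) - ((r.countP (fun c => ! vtd_fill c) : Nat) : Int)
      = ((r.countP vtd_fill : Nat) : Int) := by
  have h := List.length_eq_countP_add_countP (l := r) (p := vtd_fill)
  simp only [decide_not, Bool.decide_eq_true] at h
  omega

lemma vtd_counts_eq (td : List (List String)) :
    ((td.map (fun r => (r.length : Int))).sum)
      - ((td.map (fun r => ((r.countP (fun c => ! vtd_fill c) : Nat) : Int))).sum)
      = ((td.map (fun r => ((r.countP vtd_fill : Nat) : Int))).sum) := by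
  induction td with
  | nil => simp
  | cons r rest ih =>
    simp only [List.map_cons, List.sum_cons]
    have := vtd_row_complement r
    omega

lemma vtd_filled_eq (td : List (List String)) :
    (vtd_stack_loop td.reverse 0 0).1 - (vtd_stack_loop td.reverse 0 0).2
      = td.foldl (fun acc row => row.foldl (fun a cell =>
          if cell ≠ "" ∧ PySem.Str.strip cell ≠ "" then a + 1 else a) acc) 0 := by
  rw [vtd_stack_loop_spec, vtd_outer_fill]
  simp only [List.map_reverse, List.sum_reverse]
  have := vtd_counts_eq td
  omega

-- ===== VERDICT (by name: the statement is the Claim_ definition above) =====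
theorem validate_table_data_spec : Claim_equal_validate_table_data := by
  intro td mf _
  unfold Spec_validate_table_data validate_table_data validate_table_data_alt
  by_cases h : td = []
  · simp [h]
  · simp only [h, if_false]
    rw [← vtd_filled_eq td]
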